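-- pv_equiv track=rewrite | github.com/ror-community/curation_ops | utilities/data_dump_to_csv/convert_to_csv_v2.py | get_preferred_ext_ids
-- ===== SOURCE A (Python) =====
-- EXT_ID_TYPES = ['fundref', 'grid', 'isni', 'wikidata']
--
-- def get_preferred_ext_ids(ext_ids):
--     preferred_ids = {}
--     for ext_id_type in EXT_ID_TYPES:
--         preferred = [id['preferred'] for id in ext_ids if id['type']==ext_id_type]
--         if len(preferred) > 0:
--             preferred_ids[ext_id_type] = preferred[0]
--         else:
--             preferred_ids[ext_id_type] = None
--     return preferred_ids
-- ===== SOURCE B (Python) =====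
-- EXT_ID_TYPES = ['fundref', 'grid', 'isni', 'wikidata']
--
-- def get_preferred_ext_ids(ext_ids):
--     wanted = set(EXT_ID_TYPES)
--     first = {}
--     for entry in ext_ids:
--         t = entry['type']
--         if t in wanted and t not in first:
--             first[t] = entry['preferred']
--     return {t: first.get(t) for t in EXT_ID_TYPES}
-- ===== Notes on version B (the rewrite author's own statement) =====
-- stated objective: faster
-- what changed: Instead of one filter-and-map pass over ext_ids per external-id type (4 passes plus intermediate lists), B makes a single pass over ext_ids recording the first preferred value per wanted type in a dict, then reads the four answers off that dict.
import Mathlib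
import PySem

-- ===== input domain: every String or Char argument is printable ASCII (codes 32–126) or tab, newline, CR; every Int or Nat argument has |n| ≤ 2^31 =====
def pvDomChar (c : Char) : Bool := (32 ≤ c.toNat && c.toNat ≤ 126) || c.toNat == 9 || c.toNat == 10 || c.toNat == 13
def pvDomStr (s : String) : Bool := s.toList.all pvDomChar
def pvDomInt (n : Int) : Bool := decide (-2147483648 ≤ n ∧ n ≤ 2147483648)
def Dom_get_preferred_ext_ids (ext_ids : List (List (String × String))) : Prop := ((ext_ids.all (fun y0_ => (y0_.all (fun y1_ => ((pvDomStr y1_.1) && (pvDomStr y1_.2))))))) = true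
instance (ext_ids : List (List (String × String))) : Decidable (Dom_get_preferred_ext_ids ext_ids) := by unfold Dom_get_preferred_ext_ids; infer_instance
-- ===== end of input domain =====

-- B replaces A's one filter+map pass per type (4 passes) by a single pass over ext_ids
-- recording the first preferred value per wanted type in a dict; return value only.

def EXT_ID_TYPES : List String := ["fundref", "grid", "isni", "wikidata"]

-- ===== PORT A =====
-- id['type'] / id['preferred'] are first-match association-list lookups; Pre_ guarantees the
-- keys are present wherever A reads them, so the .getD "" defaults are never taken on Pre_.
def get_preferred_ext_ids (ext_ids : List (List (String × String))) : List (String × Option String) :=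
  (EXT_ID_TYPES.foldl (fun acc ext_id_type =>
    let preferred := (ext_ids.filter (fun d => List.lookup "type" d == some ext_id_type)).map
      (fun d => (List.lookup "preferred" d).getD "")
    acc.insert ext_id_type (if preferred.length > 0 then preferred.head? else none))
    (PySem.Dict.empty : PySem.Dict String (Option String))).items

-- ===== PORT B =====
def get_preferred_ext_ids_alt (ext_ids : List (List (String × String))) : List (String × Option String) :=
  let first : PySem.Dict String String := ext_ids.foldl (fun first d =>
    let t := (List.lookup "type" d).getD ""
    if t ∈ EXT_ID_TYPES ∧ first.contains t = false then
      first.insert t ((List.lookup "preferred" d).getD "")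
    else first) PySem.Dict.empty
  EXT_ID_TYPES.map (fun t => (t, first.get? t))

-- ===== PRECONDITION & SPEC =====
-- Pre_ excludes exactly the inputs where the Python A raises KeyError: an entry without a
-- 'type' key, or an entry of a wanted type without a 'preferred' key.
def Pre_get_preferred_ext_ids (ext_ids : List (List (String × String))) : Prop :=
  ∀ d ∈ ext_ids, (List.lookup "type" d).isSome = true ∧
    ((List.lookup "type" d).getD "" ∈ EXT_ID_TYPES → (List.lookup "preferred" d).isSome = true)
instance (ext_ids : List (List (String × String))) : Decidable (Pre_get_preferred_ext_ids ext_ids) := by unfold Pre_get_preferred_ext_ids; infer_instance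

def pvWitness_get_preferred_ext_ids : (List (List (String × String))) :=
  [[("type", "grid"), ("preferred", "grid.1")], [("type", "other")]]

def Spec_get_preferred_ext_ids (ext_ids : List (List (String × String))) (out : List (String × Option String)) : Prop := out = get_preferred_ext_ids_alt ext_ids
instance (ext_ids : List (List (String × String))) (out : List (String × Option String)) : Decidable (Spec_get_preferred_ext_ids ext_ids out) := by unfold Spec_get_preferred_ext_ids; infer_instance

-- ===== CLAIM (what is proved, stated in full; the proofs are below) =====
def Claim_equal_get_preferred_ext_ids : Prop := ∀ (ext_ids : List (List (String × String))), Dom_get_preferred_ext_ids ext_ids → Pre_get_preferred_ext_ids ext_ids → Spec_get_preferred_ext_ids ext_ids (get_preferred_ext_ids ext_ids)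

-- ===== LEMMAS AND PROOFS =====

-- B's single-pass loop, abstracted for the induction.
def pvStep (first : PySem.Dict String String) (d : List (String × String)) : PySem.Dict String String :=
  if (List.lookup "type" d).getD "" ∈ EXT_ID_TYPES ∧ first.contains ((List.lookup "type" d).getD "") = false then
    first.insert ((List.lookup "type" d).getD "") ((List.lookup "preferred" d).getD "")
  else first

lemma pvStep_preserves (d : List (String × String)) (first : PySem.Dict String String)
    (t : String) (v : String) (h : first.get? t = some v) : (pvStep first d).get? t = some v := by
  unfold pvStep
  split
  · next hc =>
    rcases hc with ⟨_, hnc⟩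
    have hne : t ≠ (List.lookup "type" d).getD "" := by
      intro he
      rw [PySem.Dict.contains_eq_isSome_get?, ← he, h] at hnc
      simp at hnc
    rw [PySem.Dict.get?_insert_of_ne _ _ hne, h]
  · exact h

lemma pvFold_preserves (l : List (List (String × String))) (first : PySem.Dict String String)
    (t : String) (v : String) (h : first.get? t = some v) :
    (l.foldl pvStep first).get? t = some v := by
  induction l generalizing first with
  | nil => exact h
  | cons d l ih => exact ih _ (pvStep_preserves d first t v h)

lemma pvFold_get? (t : String) (ht : t ∈ EXT_ID_TYPES) (l : List (List (String × String)))
    (first : PySem.Dict String String) (hacc : first.get? t = none) :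
    (l.foldl pvStep first).get? t =
      ((l.filter (fun d => List.lookup "type" d == some t)).map
        (fun d => (List.lookup "preferred" d).getD "")).head? := by
  induction l generalizing first with
  | nil => simpa using hacc
  | cons d l ih =>
    have htne : t ≠ "" := by
      intro he; rw [he] at ht; simp [EXT_ID_TYPES] at ht
    by_cases hmatch : (List.lookup "type" d).getD "" = t
    · -- d is of type t: it is kept by A's filter, and B records it (its key is unseen).
      have hlk : List.lookup "type" d = some t := by
        cases hl : List.lookup "type" d with
        | none =>
          rw [hl] at hmatch; simp at hmatch
          exact (htne hmatch).elim
        | some s =>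
          rw [hl] at hmatch; simp at hmatch; exact congrArg some hmatch
      have hnc : first.contains t = false := by
        rw [PySem.Dict.contains_eq_isSome_get?, hacc]; rfl
      have hstep : pvStep first d = first.insert t ((List.lookup "preferred" d).getD "") := by
        unfold pvStep
        rw [if_pos]
        · simp [hlk]
        · constructor
          · simpa [hlk] using ht
          · simpa [hlk] using hnc
      simp only [List.foldl_cons, hstep]
      rw [pvFold_preserves l _ t _ (PySem.Dict.get?_insert_self _ _ _)]
      simp [hlk]
    · -- d is not of type t: A's filter drops it and B leaves key t untouched.
      have hfilt : (List.lookup "type" d == some t) = false := by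
        cases hl : List.lookup "type" d with
        | none => rfl
        | some s =>
          rw [hl] at hmatch; simp at hmatch ⊢; exact fun h => hmatch (by simp [h])
      have hstep : (pvStep first d).get? t = none := by
        unfold pvStep
        split
        · next hc =>
          have hne : t ≠ (List.lookup "type" d).getD "" := fun he => hmatch he.symm
          rw [PySem.Dict.get?_insert_of_ne _ _ hne]; exact hacc
        · exact hacc
      simpa [List.filter_cons, hfilt] using ih _ hstep

lemma pvA_items (f : String → Option String) :
    (EXT_ID_TYPES.foldl (fun acc t => acc.insert t (f t))
      (PySem.Dict.empty : PySem.Dict String (Option String))).items =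
    EXT_ID_TYPES.map (fun t => (t, f t)) := by
  have h := PySem.Dict.items_foldl_insert_fresh EXT_ID_TYPES (fun t => t) f
    PySem.Dict.empty (fun _ _ => PySem.Dict.contains_empty _) (by decide)
  simpa using h

lemma pvHead?_if (pref : List String) :
    (if pref.length > 0 then pref.head? else none) = pref.head? := by
  cases pref <;> simp

-- ===== VERDICT (by name: the statement is the Claim_ definition above) =====
theorem get_preferred_ext_ids_spec : Claim_equal_get_preferred_ext_ids := by
  intro ext_ids _ _
  unfold Spec_get_preferred_ext_ids get_preferred_ext_ids get_preferred_ext_ids_alt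
  show (EXT_ID_TYPES.foldl (fun acc ext_id_type =>
      acc.insert ext_id_type
        (if ((ext_ids.filter (fun d => List.lookup "type" d == some ext_id_type)).map
            (fun d => (List.lookup "preferred" d).getD "")).length > 0
         then ((ext_ids.filter (fun d => List.lookup "type" d == some ext_id_type)).map
            (fun d => (List.lookup "preferred" d).getD "")).head?
         else none))
      (PySem.Dict.empty : PySem.Dict String (Option String))).items =
    EXT_ID_TYPES.map (fun t => (t, (ext_ids.foldl pvStep PySem.Dict.empty).get? t))
  rw [pvA_items (fun ext_id_type =>
      (if ((ext_ids.filter (fun d => List.lookup "type" d == some ext_id_type)).map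
            (fun d => (List.lookup "preferred" d).getD "")).length > 0
       then ((ext_ids.filter (fun d => List.lookup "type" d == some ext_id_type)).map
            (fun d => (List.lookup "preferred" d).getD "")).head?
       else none))]
  refine List.map_congr_left ?_
  intro t ht
  rw [pvHead?_if, pvFold_get? t ht ext_ids PySem.Dict.empty (PySem.Dict.get?_empty _)]
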